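-- pv_equiv track=rewrite | github.com/mrkbac/robotic-tools | pymcap-cli/src/pymcap_cli/display/display_utils.py | _downsample_to_width
-- ===== SOURCE A (Python) =====
-- def _downsample_to_width(counts: list[int], target_width: int) -> list[int]:
--     num_buckets = len(counts)
--     buckets_per_char = num_buckets / target_width
--
--     scaled = []
--     for i in range(target_width):
--         start_idx = int(i * buckets_per_char)
--         end_idx = int((i + 1) * buckets_per_char)
--         # Take max value in this range (preserves peaks)
--         if start_idx < end_idx:
--             scaled.append(max(counts[start_idx:end_idx]))
--         else:
--             scaled.append(0)
--
--     return scaled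
-- ===== SOURCE B (Python) =====
-- def _bisect_right(a, x):
--     lo, hi = 0, len(a)
--     while lo < hi:
--         mid = (lo + hi) // 2
--         if x < a[mid]:
--             hi = mid
--         else:
--             lo = mid + 1
--     return lo
--
--
-- def _downsample_to_width(counts: list[int], target_width: int) -> list[int]:
--     n = len(counts)
--     bpc = n / target_width
--
--     # Bucket end boundaries (bucket i covers [ends[i-1], ends[i]), ends[-1] = 0).
--     ends = [int((i + 1) * bpc) for i in range(target_width)]
--
--     # One forward pass: classify each input index into its bucket, keep a running max.
--     result = [None] * target_width
--     for j, c in enumerate(counts):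
--         i = _bisect_right(ends, j)
--         if i < target_width:
--             cur = result[i]
--             result[i] = c if cur is None or c > cur else cur
--
--     return [0 if v is None else v for v in result]
-- ===== Notes on version B (the rewrite author's own statement) =====
-- stated objective: alternative
-- what changed: A scans each output bucket and takes max over a slice counts[start:end]; B instead precomputes the bucket end-boundary table once, makes a single forward pass over counts classifying each input index into its bucket by binary search on that table, and keeps a running max per bucket in a None-initialised result array.
import Mathlib
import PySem

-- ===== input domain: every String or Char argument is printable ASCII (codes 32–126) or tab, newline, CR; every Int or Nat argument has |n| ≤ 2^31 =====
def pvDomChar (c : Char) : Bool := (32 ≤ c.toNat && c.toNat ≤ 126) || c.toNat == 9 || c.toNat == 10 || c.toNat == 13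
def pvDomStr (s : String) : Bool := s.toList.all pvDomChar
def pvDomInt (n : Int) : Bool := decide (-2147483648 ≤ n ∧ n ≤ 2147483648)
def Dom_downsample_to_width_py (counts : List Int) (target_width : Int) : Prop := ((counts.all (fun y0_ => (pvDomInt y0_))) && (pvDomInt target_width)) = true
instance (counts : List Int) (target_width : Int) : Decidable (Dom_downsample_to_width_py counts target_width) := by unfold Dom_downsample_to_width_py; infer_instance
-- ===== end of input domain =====

-- B re-implements A's per-bucket slice-and-max scan as one forward pass that classifies each
-- input index into its bucket via a precomputed boundary table and binary search (objective:
-- alternative decomposition, same exact values).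
--
-- FLOAT SEMANTICS: Python's `num_buckets / target_width` is true float division, so each port
-- carries an exact integer emulation of IEEE-754 binary64 round-to-nearest-even (unbounded
-- exponent; a float is a mantissa·2^exponent pair).  The two ports emulate it INDEPENDENTLY,
-- each in its own style; the lemma section proves the two emulations pointwise equal.
-- This is exact for every quotient and product below the float overflow threshold; overflow
-- (where Python raises OverflowError) needs lists of length ≥ (2^1024 - 2^970)·|target_width|,
-- sizes with no physical representation.

-- ===== PORT A =====
-- A-side float emulation: round-to-nearest-even by comparing twice the remainder against the
-- divisor; exponent of a quotient found by a cross-multiplication test on the two logs.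

-- round a/b to the nearest integer, ties to even (b > 0)
def pvRNE (a b : Nat) : Nat :=
  let q := a / b
  let r := a % b
  if b < 2 * r then q + 1 else if 2 * r < b then q else if q % 2 = 0 then q else q + 1

-- IEEE binary64 quotient n/w as (m, e) with value m·2^e (n ≥ 0, w ≥ 1)
def pvDivF (n w : Nat) : Nat × Int :=
  if n = 0 then (0, 0) else
  let la := Nat.log2 n
  let lb := Nat.log2 w
  let fl : Int := if w * 2 ^ la ≤ n * 2 ^ lb then (la : Int) - lb else (la : Int) - lb - 1
  let e : Int := fl - 52
  if e ≤ 0 then (pvRNE (n * 2 ^ (-e).toNat) w, e) else (pvRNE n (w * 2 ^ e.toNat), e)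

-- round the integer a to 53 significant bits (round-to-nearest-even)
def pvQ (a : Nat) : Nat :=
  if a < 2 ^ 53 then a else
  let s := Nat.log2 a - 52
  pvRNE a (2 ^ s) * 2 ^ s

-- IEEE binary64 product i·f for an integer i < 2^53 (exactly representable) and float f
def pvMulF (i : Nat) (f : Nat × Int) : Nat × Int := (pvQ (i * f.1), f.2)

-- int(x) for a nonnegative float x = m·2^e (truncation = floor)
def pvTruncF (f : Nat × Int) : Nat :=
  if 0 ≤ f.2 then f.1 * 2 ^ f.2.toNat else f.1 / 2 ^ (-f.2).toNat

-- `buckets_per_char` is consumed only inside the loop over range(target_width), which is empty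
-- for negative widths, so only |target_width| matters; target_width = 0 is excluded by Pre_.
-- Python's max() raises ValueError on an empty slice; that needs int(i*bpc) ≥ len(counts) with
-- int(i*bpc) < int((i+1)*bpc), impossible for |target_width| ≤ 2^31 (all of Dom), so the
-- `.getD 0` below is never consulted on the inputs the claim covers.
def downsample_to_width_py (counts : List Int) (target_width : Int) : List Int :=
  let num_buckets : Nat := counts.length
  let buckets_per_char := pvDivF num_buckets target_width.natAbs
  (PySem.List.pyRange 0 target_width 1).foldl
    (fun scaled i =>
      let start_idx := pvTruncF (pvMulF i.toNat buckets_per_char)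
      let end_idx := pvTruncF (pvMulF (i.toNat + 1) buckets_per_char)
      if start_idx < end_idx then
        scaled ++ [(PySem.List.max? (PySem.List.slice counts (some (start_idx : Int)) (some (end_idx : Int))) id).getD 0]
      else
        scaled ++ [0]) []

-- ===== PORT B =====
-- B-side float emulation, written in a different style: rounding as round-half-up with an
-- explicit tie correction, the quotient obtained from a single pre-shifted numerator whose
-- own bit length gives the exponent, and truncation done with bit shifts.

-- round a/b to nearest, ties to even: round-half-up (2a+b)/(2b) unless an even-quotient tie
def bRound (a b : Nat) : Nat :=
  if 2 * (a % b) = b ∧ (a / b) % 2 = 0 then a / b else (2 * a + b) / (2 * b)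

-- IEEE binary64 quotient n/w (n ≥ 0, w ≥ 1): shift n up by 53 + ⌊log2 w⌋ bits so the integer
-- quotient has at least 54 bits, read the exponent off its bit length, then round once
def bDiv (n w : Nat) : Nat × Int :=
  if n = 0 then (0, 0) else
  let s := 53 + w.log2
  let t := (n <<< s / w).log2
  (bRound (n <<< s) (w <<< (t - 52)), (t : Int) - 52 - s)

-- round the integer a to 53 significant bits (the shift is 0, hence the identity, for a < 2^53)
def bQ (a : Nat) : Nat :=
  let s := a.log2 - 52
  bRound a (1 <<< s) <<< s

-- product i·f and truncation to int, on mantissa/exponent pairs, truncation via bit shifts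
def bMul (i : Nat) (f : Nat × Int) : Nat × Int :=
  match f with
  | (m, e) => (bQ (i * m), e)

def bTrunc (f : Nat × Int) : Nat :=
  match f with
  | (m, Int.ofNat k) => m <<< k
  | (m, Int.negSucc k) => m >>> (k + 1)

-- Source B's update expression `c if cur is None or c > cur else cur`
def pvUpd (cur : Option Int) (c : Int) : Option Int :=
  match cur with
  | none => some c
  | some v => some (if c > v then c else v)

-- Source B's hand-written _bisect_right is the standard lo/hi binary-search loop; its Lean
-- counterpart is PySem.List.bisectRight (the same loop, fueled for totality).
def downsample_to_width_py_alt (counts : List Int) (target_width : Int) : List Int :=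
  let n : Nat := counts.length
  let bpc := bDiv n target_width.natAbs
  let ends : List Int :=
    (PySem.List.pyRange 0 target_width 1).map
      (fun i => ((bTrunc (bMul (i.toNat + 1) bpc) : Nat) : Int))
  let result0 : List (Option Int) := List.replicate target_width.toNat none
  let result := (PySem.List.enumerate counts 0).foldl
    (fun res jc =>
      let i := PySem.List.bisectRight ends jc.1
      if (i : Int) < target_width then res.set i (pvUpd (res.getD i none) jc.2) else res)
    result0
  result.map (fun v => v.getD 0)

-- ===== PRECONDITION & SPEC =====
-- Pre_ excludes target_width = 0, where the Python A raises ZeroDivisionError (and B does too).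
def Pre_downsample_to_width_py (counts : List Int) (target_width : Int) : Prop :=
  target_width ≠ 0
instance (counts : List Int) (target_width : Int) : Decidable (Pre_downsample_to_width_py counts target_width) := by
  unfold Pre_downsample_to_width_py; infer_instance

def pvWitness_downsample_to_width_py : List Int × Int := ([3, -1, 4, 1, 5, 9, 2, 6], 3)

def Spec_downsample_to_width_py (counts : List Int) (target_width : Int) (out : List Int) : Prop := out = downsample_to_width_py_alt counts target_width
instance (counts : List Int) (target_width : Int) (out : List Int) : Decidable (Spec_downsample_to_width_py counts target_width out) := by unfold Spec_downsample_to_width_py; infer_instance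

-- ===== CLAIM (what is proved, stated in full; the proofs are below) =====
def Claim_equal_downsample_to_width_py : Prop := ∀ (counts : List Int) (target_width : Int), Dom_downsample_to_width_py counts target_width → Pre_downsample_to_width_py counts target_width → Spec_downsample_to_width_py counts target_width (downsample_to_width_py counts target_width)

-- ===== LEMMAS AND PROOFS =====

-- ---- the two float emulations agree ----

theorem bRound_eq (a b : Nat) (hb : 0 < b) : bRound a b = pvRNE a b := by
  have hqr := Nat.div_add_mod a b
  have hrb : a % b < b := Nat.mod_lt _ hb
  set q := a / b with hq
  set r := a % b with hr
  have h2 : 2 * a + b = (2 * b) * q + (2 * r + b) := by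
    have h2' : (2 * b) * q + (2 * r + b) = 2 * (b * q + r) + b := by ring
    rw [h2', hqr]
  have hh : (2 * a + b) / (2 * b) = q + (2 * r + b) / (2 * b) := by
    rw [h2, Nat.mul_add_div (by omega)]
  have hcase : (2 * r + b) / (2 * b) = if b ≤ 2 * r then 1 else 0 := by
    split_ifs with hc
    · exact Nat.div_eq_of_lt_le (by omega) (by omega)
    · exact Nat.div_eq_of_lt (by omega)
  simp only [bRound, pvRNE, ← hq, ← hr, hh, hcase]
  split_ifs <;> omega

theorem pvRNE_scale (k a b : Nat) : pvRNE (2 ^ k * a) (2 ^ k * b) = pvRNE a b := by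
  have hk : 0 < 2 ^ k := Nat.two_pow_pos k
  simp only [pvRNE, Nat.mul_div_mul_left _ _ hk, Nat.mul_mod_mul_left]
  have h1 : (2 ^ k * b < 2 * (2 ^ k * (a % b))) ↔ (b < 2 * (a % b)) := by
    constructor <;> intro h <;> nlinarith
  have h2 : (2 * (2 ^ k * (a % b)) < 2 ^ k * b) ↔ (2 * (a % b) < b) := by
    constructor <;> intro h <;> nlinarith
  simp only [h1, h2]

theorem log2_eq_iff {m k : Nat} (hm : 0 < m) : Nat.log2 m = k ↔ (2 ^ k ≤ m ∧ m < 2 ^ (k + 1)) := by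
  constructor
  · intro h
    refine ⟨?_, ?_⟩
    · rw [← h]; exact Nat.log2_self_le (by omega)
    · rw [← h]; exact Nat.lt_log2_self
  · rintro ⟨h1, h2⟩
    have ha : k ≤ Nat.log2 m := (Nat.le_log2 (by omega)).mpr h1
    have hb : Nat.log2 m < k + 1 := by
      by_contra hc
      have : 2 ^ (k + 1) ≤ 2 ^ Nat.log2 m := Nat.pow_le_pow_right (by norm_num) (by omega)
      have := Nat.log2_self_le (n := m) (by omega)
      omega
    omega

theorem bDiv_eq (n w : Nat) (hw : 0 < w) : bDiv n w = pvDivF n w := by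
  rcases Nat.eq_zero_or_pos n with hn | hn
  · subst hn; simp [bDiv, pvDivF, Nat.shiftLeft_eq]
  simp only [bDiv, pvDivF, Nat.shiftLeft_eq, Nat.one_shiftLeft, if_neg (by omega : ¬ n = 0)]
  set la := Nat.log2 n with hla
  set lb := Nat.log2 w with hlb
  have hna : 2 ^ la ≤ n := Nat.log2_self_le (by omega)
  have hna' : n < 2 ^ (la + 1) := Nat.lt_log2_self
  have hwb : 2 ^ lb ≤ w := Nat.log2_self_le (by omega)
  have hwb' : w < 2 ^ (lb + 1) := Nat.lt_log2_self
  set s := 53 + lb with hs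
  have hqpos : 0 < n * 2 ^ s / w := by
    apply Nat.div_pos ?_ hw
    calc w ≤ 2 ^ s := le_of_lt (lt_of_lt_of_le hwb' (Nat.pow_le_pow_right (by norm_num) (by omega)))
      _ ≤ n * 2 ^ s := Nat.le_mul_of_pos_left _ hn
  have ht : Nat.log2 (n * 2 ^ s / w) = (if w * 2 ^ la ≤ n * 2 ^ lb then la + 53 else la + 52) := by
    split_ifs with hc
    · rw [log2_eq_iff hqpos]
      constructor
      · rw [Nat.le_div_iff_mul_le hw]
        calc 2 ^ (la + 53) * w = (w * 2 ^ la) * 2 ^ 53 := by ring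
          _ ≤ (n * 2 ^ lb) * 2 ^ 53 := Nat.mul_le_mul_right _ hc
          _ = n * 2 ^ s := by rw [hs, pow_add]; ring
      · rw [Nat.div_lt_iff_lt_mul hw]
        calc n * 2 ^ s = (n * 2 ^ lb) * 2 ^ 53 := by rw [hs, pow_add]; ring
          _ < (2 ^ (la + 1) * 2 ^ lb) * 2 ^ 53 := by
              have h53 : (0:Nat) < 2 ^ 53 := Nat.two_pow_pos _
              have hlt : n * 2 ^ lb < 2 ^ (la + 1) * 2 ^ lb :=
                (Nat.mul_lt_mul_right (Nat.two_pow_pos _)).mpr hna'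
              exact (Nat.mul_lt_mul_right h53).mpr hlt
          _ = 2 ^ (la + 53 + 1) * 2 ^ lb := by rw [← pow_add, ← pow_add, ← pow_add]; ring_nf
          _ ≤ 2 ^ (la + 53 + 1) * w := Nat.mul_le_mul_left _ hwb
    · push_neg at hc
      rw [log2_eq_iff hqpos]
      constructor
      · rw [Nat.le_div_iff_mul_le hw]
        have h1 : 2 ^ (la + 52) * (w + 1) ≤ 2 ^ (la + 52) * 2 ^ (lb + 1) :=
          Nat.mul_le_mul_left _ (by omega)
        have h2 : (2 : Nat) ^ (la + 52) * 2 ^ (lb + 1) = 2 ^ la * 2 ^ s := by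
          rw [hs, ← pow_add, ← pow_add]; ring_nf
        have h3 : 2 ^ la * 2 ^ s ≤ n * 2 ^ s := Nat.mul_le_mul_right _ hna
        nlinarith [Nat.two_pow_pos (la + 52)]
      · rw [Nat.div_lt_iff_lt_mul hw]
        calc n * 2 ^ s = (n * 2 ^ lb) * 2 ^ 53 := by rw [hs, pow_add]; ring
          _ < (w * 2 ^ la) * 2 ^ 53 := by
              have h53 : (0:Nat) < 2 ^ 53 := Nat.two_pow_pos _
              exact (Nat.mul_lt_mul_right h53).mpr hc
          _ = 2 ^ (la + 52 + 1) * w := by rw [pow_add, pow_add]; ring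
  rw [ht]
  by_cases hc : w * 2 ^ la ≤ n * 2 ^ lb
  · rw [if_pos hc, if_pos hc]
    by_cases he : ((la : Int) - lb - 52 : Int) ≤ 0
    · rw [if_pos he]
      have hk : (-(((la : Int) - lb) - 52)).toNat = 52 + lb - la := by omega
      have hla52 : la ≤ 52 + lb := by omega
      refine Prod.ext ?_ ?_
      · show bRound (n * 2 ^ s) (w * 2 ^ (la + 53 - 52)) = pvRNE (n * 2 ^ (-(((la:Int) - lb) - 52)).toNat) w
        rw [hk]
        have h1 : la + 53 - 52 = la + 1 := by omega
        have h2 : n * 2 ^ s = 2 ^ (la + 1) * (n * 2 ^ (52 + lb - la)) := by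
          rw [← mul_assoc, mul_comm (2 ^ (la+1)) n, mul_assoc, ← pow_add]
          congr 2
          omega
        have h3 : w * 2 ^ (la + 1) = 2 ^ (la + 1) * w := mul_comm _ _
        rw [h1, h2, h3, bRound_eq _ _ (by positivity), pvRNE_scale]
      · show (((la + 53 : Nat) : Int) - 52 - s) = ((la : Int) - lb) - 52
        push_cast [hs]
        omega
    · rw [if_neg he]
      push_neg at he
      have hk : (((la : Int) - lb) - 52).toNat = la - lb - 52 := by omega
      have hla52 : lb + 52 < la := by omega
      refine Prod.ext ?_ ?_
      · show bRound (n * 2 ^ s) (w * 2 ^ (la + 53 - 52)) = pvRNE n (w * 2 ^ (((la:Int) - lb) - 52).toNat)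
        rw [hk]
        have h1 : la + 53 - 52 = la + 1 := by omega
        have h2 : n * 2 ^ s = 2 ^ s * n := mul_comm _ _
        have h3 : w * 2 ^ (la + 1) = 2 ^ s * (w * 2 ^ (la - lb - 52)) := by
          rw [← mul_assoc, mul_comm (2 ^ s) w, mul_assoc, ← pow_add]
          congr 2
          omega
        rw [h1, h2, h3, bRound_eq _ _ (by positivity), pvRNE_scale]
      · show (((la + 53 : Nat) : Int) - 52 - s) = ((la : Int) - lb) - 52
        push_cast [hs]
        omega
  · rw [if_neg hc, if_neg hc]
    by_cases he : ((la : Int) - lb - 1 - 52 : Int) ≤ 0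
    · rw [if_pos he]
      have hk : (-(((la : Int) - lb - 1) - 52)).toNat = 53 + lb - la := by omega
      have hla53 : la ≤ 53 + lb := by omega
      refine Prod.ext ?_ ?_
      · show bRound (n * 2 ^ s) (w * 2 ^ (la + 52 - 52)) = pvRNE (n * 2 ^ (-(((la:Int) - lb - 1) - 52)).toNat) w
        rw [hk]
        have h1 : la + 52 - 52 = la := by omega
        have h2 : n * 2 ^ s = 2 ^ la * (n * 2 ^ (53 + lb - la)) := by
          rw [← mul_assoc, mul_comm (2 ^ la) n, mul_assoc, ← pow_add]
          congr 2
          omega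
        have h3 : w * 2 ^ la = 2 ^ la * w := mul_comm _ _
        rw [h1, h2, h3, bRound_eq _ _ (by positivity), pvRNE_scale]
      · show (((la + 52 : Nat) : Int) - 52 - s) = ((la : Int) - lb - 1) - 52
        push_cast [hs]
        omega
    · rw [if_neg he]
      push_neg at he
      have hk : (((la : Int) - lb - 1) - 52).toNat = la - lb - 53 := by omega
      have hla53 : lb + 53 < la := by omega
      refine Prod.ext ?_ ?_
      · show bRound (n * 2 ^ s) (w * 2 ^ (la + 52 - 52)) = pvRNE n (w * 2 ^ (((la:Int) - lb - 1) - 52).toNat)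
        rw [hk]
        have h1 : la + 52 - 52 = la := by omega
        have h2 : n * 2 ^ s = 2 ^ s * n := mul_comm _ _
        have h3 : w * 2 ^ la = 2 ^ s * (w * 2 ^ (la - lb - 53)) := by
          rw [← mul_assoc, mul_comm (2 ^ s) w, mul_assoc, ← pow_add]
          congr 2
          omega
        rw [h1, h2, h3, bRound_eq _ _ (by positivity), pvRNE_scale]
      · show (((la + 52 : Nat) : Int) - 52 - s) = ((la : Int) - lb - 1) - 52
        push_cast [hs]
        omega

theorem bQ_eq (a : Nat) : bQ a = pvQ a := by
  by_cases h : a < 2 ^ 53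
  · have hl : Nat.log2 a < 53 := by
      rcases Nat.eq_zero_or_pos a with h0 | h0
      · simp [h0, Nat.log2]
      · by_contra hcon
        have h1 : 2 ^ 53 ≤ 2 ^ Nat.log2 a := Nat.pow_le_pow_right (by norm_num) (by omega)
        have h2 := Nat.log2_self_le (by omega : a ≠ 0)
        omega
    have hs : Nat.log2 a - 52 = 0 := by omega
    have hbr : bRound a 1 = a := by
      simp only [bRound, Nat.mod_one, Nat.div_one]
      rw [if_neg (by omega)]
      omega
    simp only [bQ, Nat.shiftLeft_eq, one_mul, hs, pow_zero, mul_one, hbr, pvQ, if_pos h]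
  · push_neg at h
    simp only [bQ, Nat.shiftLeft_eq, one_mul, pvQ, if_neg (by omega : ¬ a < 2 ^ 53)]
    rw [bRound_eq _ _ (Nat.two_pow_pos _)]

theorem bMul_eq (i : Nat) (f : Nat × Int) : bMul i f = pvMulF i f := by
  obtain ⟨m, e⟩ := f
  simp [bMul, pvMulF, bQ_eq]

theorem bTrunc_eq (f : Nat × Int) : bTrunc f = pvTruncF f := by
  obtain ⟨m, e⟩ := f
  cases e with
  | ofNat k => simp [bTrunc, pvTruncF, Nat.shiftLeft_eq]
  | negSucc k =>
      simp only [bTrunc, pvTruncF, Nat.shiftRight_eq_div_pow]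
      rw [if_neg (by omega)]
      norm_num

-- ---- A-side rounding arithmetic (monotonicity of the boundary map) ----

theorem pvRNE_ge (a b : Nat) : a / b ≤ pvRNE a b := by
  simp only [pvRNE]; split_ifs <;> omega

theorem pvRNE_le (a b : Nat) : pvRNE a b ≤ a / b + 1 := by
  simp only [pvRNE]; split_ifs <;> omega

theorem pvRNE_mono (b : Nat) {a a' : Nat} (h : a ≤ a') : pvRNE a b ≤ pvRNE a' b := by
  have hq : a / b ≤ a' / b := Nat.div_le_div_right h
  rcases eq_or_lt_of_le hq with heq | hlt
  · have h1 := Nat.div_add_mod a b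
    have h2 := Nat.div_add_mod a' b
    rw [heq] at h1
    have hr : a % b ≤ a' % b := by omega
    simp only [pvRNE, heq]; split_ifs <;> omega
  · have g1 := pvRNE_le a b
    have g2 := pvRNE_ge a' b
    omega

theorem pvQ_low {a : Nat} (h : 2 ^ 53 ≤ a) : 2 ^ Nat.log2 a ≤ pvQ a := by
  have ha0 : a ≠ 0 := by positivity
  have hla : 53 ≤ Nat.log2 a := (Nat.le_log2 ha0).mpr h
  have hs : Nat.log2 a - 52 ≤ Nat.log2 a := Nat.sub_le _ _
  simp only [pvQ, if_neg (by omega : ¬ a < 2 ^ 53)]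
  calc 2 ^ Nat.log2 a = 2 ^ (Nat.log2 a - (Nat.log2 a - 52)) * 2 ^ (Nat.log2 a - 52) := by
        rw [← pow_add]; congr 1; omega
    _ ≤ a / 2 ^ (Nat.log2 a - 52) * 2 ^ (Nat.log2 a - 52) := by
        apply Nat.mul_le_mul_right
        rw [← Nat.pow_div hs (by norm_num)]
        exact Nat.div_le_div_right (Nat.log2_self_le ha0)
    _ ≤ pvRNE a (2 ^ (Nat.log2 a - 52)) * 2 ^ (Nat.log2 a - 52) := by
        exact Nat.mul_le_mul_right _ (pvRNE_ge _ _)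

theorem pvQ_high {a : Nat} (h : 2 ^ 53 ≤ a) : pvQ a ≤ 2 ^ (Nat.log2 a + 1) := by
  have ha0 : a ≠ 0 := by positivity
  have hla : 53 ≤ Nat.log2 a := (Nat.le_log2 ha0).mpr h
  have hs : Nat.log2 a - 52 ≤ Nat.log2 a + 1 := by omega
  simp only [pvQ, if_neg (by omega : ¬ a < 2 ^ 53)]
  have hdivlt : a / 2 ^ (Nat.log2 a - 52) < 2 ^ (Nat.log2 a + 1 - (Nat.log2 a - 52)) := by
    rw [Nat.div_lt_iff_lt_mul (by positivity)]
    calc a < 2 ^ (Nat.log2 a + 1) := Nat.lt_log2_self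
      _ = 2 ^ (Nat.log2 a + 1 - (Nat.log2 a - 52)) * 2 ^ (Nat.log2 a - 52) := by
          rw [← pow_add]; congr 1; omega
  calc pvRNE a (2 ^ (Nat.log2 a - 52)) * 2 ^ (Nat.log2 a - 52)
      ≤ (a / 2 ^ (Nat.log2 a - 52) + 1) * 2 ^ (Nat.log2 a - 52) :=
        Nat.mul_le_mul_right _ (pvRNE_le _ _)
    _ ≤ 2 ^ (Nat.log2 a + 1 - (Nat.log2 a - 52)) * 2 ^ (Nat.log2 a - 52) :=
        Nat.mul_le_mul_right _ (by omega)
    _ = 2 ^ (Nat.log2 a + 1) := by rw [← pow_add]; congr 1; omega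

theorem pvQ_mono {a a' : Nat} (h : a ≤ a') : pvQ a ≤ pvQ a' := by
  by_cases ha' : a' < 2 ^ 53
  · have ha : a < 2 ^ 53 := lt_of_le_of_lt h ha'
    simp only [pvQ, if_pos ha, if_pos ha']; exact h
  · rw [not_lt] at ha'
    by_cases ha : a < 2 ^ 53
    · have : (a : Nat) < 2 ^ Nat.log2 a' := by
        calc a < 2 ^ 53 := ha
          _ ≤ 2 ^ Nat.log2 a' := Nat.pow_le_pow_right (by norm_num)
                ((Nat.le_log2 (by positivity)).mpr ha')
      simp only [pvQ, if_pos ha]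
      exact le_trans this.le (pvQ_low ha')
    · rw [not_lt] at ha
      have hlog : Nat.log2 a ≤ Nat.log2 a' := by
        rw [Nat.le_log2 (by positivity)]
        exact le_trans (Nat.log2_self_le (by positivity)) h
      rcases eq_or_lt_of_le hlog with heq | hlt
      · simp only [pvQ, if_neg (by omega : ¬ a < 2 ^ 53), if_neg (by omega : ¬ a' < 2 ^ 53), ← heq]
        exact Nat.mul_le_mul_right _ (pvRNE_mono _ h)
      · calc pvQ a ≤ 2 ^ (Nat.log2 a + 1) := pvQ_high ha
          _ ≤ 2 ^ Nat.log2 a' := Nat.pow_le_pow_right (by norm_num) (by omega)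
          _ ≤ pvQ a' := pvQ_low ha'

theorem pvE_mono (bpc : Nat × Int) {i i' : Nat} (h : i ≤ i') :
    pvTruncF (pvMulF i bpc) ≤ pvTruncF (pvMulF i' bpc) := by
  have hq : pvQ (i * bpc.1) ≤ pvQ (i' * bpc.1) := pvQ_mono (Nat.mul_le_mul_right _ h)
  simp only [pvMulF, pvTruncF]
  split_ifs
  · exact Nat.mul_le_mul_right _ hq
  · exact Nat.div_le_div_right hq

theorem pvE_zero (bpc : Nat × Int) : pvTruncF (pvMulF 0 bpc) = 0 := by
  have : pvQ 0 = 0 := by simp [pvQ]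
  simp [pvMulF, pvTruncF, this]

-- ---- binary-search bucket characterisation and the B-side fold ----

theorem bucket_eq (E : Nat → Nat) (hE : ∀ {p q : Nat}, p ≤ q → E p ≤ E q) (hE0 : E 0 = 0)
    (W : Nat) (ends : List Int) (hlen : ends.length = W)
    (hval : ∀ (k : Nat) (hk : k < ends.length), ends[k] = (E (k + 1) : Int))
    (j : Int) (hj : 0 ≤ j) (i : Nat) (hi : i < W) :
    PySem.List.bisectRight ends j = i ↔ ((E i : Int) ≤ j ∧ j < (E (i + 1) : Int)) := by
  have hpw : List.Pairwise (fun x1 x2 => x1 ≤ x2) ends := by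
    rw [List.pairwise_iff_getElem]
    intro p q hp hq hpq
    rw [hval p hp, hval q hq]
    exact_mod_cast hE (by omega)
  obtain ⟨hr1, hr2, hr3⟩ := PySem.List.bisectRight_spec ends j hpw
  constructor
  · intro hri
    constructor
    · rcases Nat.eq_zero_or_pos i with h0 | h0
      · rw [h0, hE0]; exact_mod_cast hj
      · have hk : i - 1 < ends.length := by omega
        have := hr2 (i - 1) hk (by omega)
        rw [hval (i - 1) hk] at this
        have hik : i - 1 + 1 = i := by omega
        rw [hik] at this; exact this
    · have hk : i < ends.length := by omega
      have := hr3 i hk (by omega)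
      rw [hval i hk] at this; exact this
  · rintro ⟨h1, h2⟩
    by_contra hne
    rcases lt_trichotomy (PySem.List.bisectRight ends j) i with hlt | heq | hgt
    · have hk : PySem.List.bisectRight ends j < ends.length := by omega
      have := hr3 _ hk (le_refl _)
      rw [hval _ hk] at this
      have hmono : (E (PySem.List.bisectRight ends j + 1) : Int) ≤ (E i : Int) := by
        exact_mod_cast hE (by omega)
      omega
    · exact hne heq
    · have hk : i < ends.length := by omega
      have := hr2 i hk hgt
      rw [hval i hk] at this
      omega

theorem foldB_len (g : Int → Nat) (tw : Int) (l : List (Int × Int)) :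
    ∀ res : List (Option Int),
      (l.foldl (fun res jc => if ((g jc.1 : Int) < tw) then res.set (g jc.1) (pvUpd (res.getD (g jc.1) none) jc.2) else res) res).length = res.length := by
  induction l with
  | nil => intro res; rfl
  | cons p l ih =>
    intro res
    simp only [List.foldl_cons]
    rw [ih]
    split <;> simp [List.length_set]

theorem foldB_get (g : Int → Nat) (tw : Int) (cs : List Int) :
    ∀ (s : Int) (res : List (Option Int)) (i : Nat), i < res.length → (i : Int) < tw →
      ((PySem.List.enumerate cs s).foldl (fun res jc => if ((g jc.1 : Int) < tw) then res.set (g jc.1) (pvUpd (res.getD (g jc.1) none) jc.2) else res) res).getD i none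
        = (PySem.List.enumerate cs s).foldl (fun acc jc => if g jc.1 = i then pvUpd acc jc.2 else acc) (res.getD i none) := by
  induction cs with
  | nil => intro s res i hi hiw; simp [PySem.List.enumerate_nil]
  | cons c cs ih =>
    intro s res i hi hiw
    rw [PySem.List.enumerate_cons]
    simp only [List.foldl_cons]
    have hstep : ((if ((g s : Int) < tw) then res.set (g s) (pvUpd (res.getD (g s) none) c) else res) : List (Option Int)).getD i none
        = (if g s = i then pvUpd (res.getD i none) c else res.getD i none) := by
      split_ifs with hc hg hg
      · subst hg
        rw [List.getD_eq_getElem?_getD, List.getElem?_set_self hi]; rfl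
      · rw [List.getD_eq_getElem?_getD, List.getElem?_set_ne hg, ← List.getD_eq_getElem?_getD]
      · exfalso; apply hc; rw [hg]; exact hiw
      · rfl
    have hlen : ((if ((g s : Int) < tw) then res.set (g s) (pvUpd (res.getD (g s) none) c) else res) : List (Option Int)).length = res.length := by
      split <;> simp [List.length_set]
    rw [ih (s + 1) _ i (by rw [hlen]; exact hi) hiw, hstep]

theorem acc_skip (g : Int → Nat) (i : Nat) (l : List (Int × Int)) (h : ∀ p ∈ l, g p.1 ≠ i) (a0 : Option Int) :
    l.foldl (fun acc jc => if g jc.1 = i then pvUpd acc jc.2 else acc) a0 = a0 := by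
  induction l generalizing a0 with
  | nil => rfl
  | cons p l ih =>
    simp only [List.foldl_cons, if_neg (h p List.mem_cons_self)]
    exact ih (fun q hq => h q (List.mem_cons_of_mem _ hq)) a0

theorem acc_all (g : Int → Nat) (i : Nat) (l : List (Int × Int)) (h : ∀ p ∈ l, g p.1 = i) (a0 : Option Int) :
    l.foldl (fun acc jc => if g jc.1 = i then pvUpd acc jc.2 else acc) a0
      = l.foldl (fun acc jc => pvUpd acc jc.2) a0 := by
  induction l generalizing a0 with
  | nil => rfl
  | cons p l ih =>
    simp only [List.foldl_cons, if_pos (h p List.mem_cons_self)]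
    exact ih (fun q hq => h q (List.mem_cons_of_mem _ hq)) _

theorem enum_snd_fold (S : List Int) (s : Int) (a0 : Option Int) :
    (PySem.List.enumerate S s).foldl (fun acc jc => pvUpd acc jc.2) a0 = S.foldl pvUpd a0 := by
  conv_rhs => rw [← PySem.List.map_snd_enumerate S s]
  rw [List.foldl_map]

theorem foldl_max_mem (t : List Int) : ∀ h : Int, t.foldl max h ∈ h :: t := by
  induction t with
  | nil => intro h; simp
  | cons c t ih =>
    intro h
    simp only [List.foldl_cons]
    rcases max_choice h c with hm | hm <;> rw [hm] <;>
      [rcases List.mem_cons.mp (ih h) with h1 | h1; rcases List.mem_cons.mp (ih c) with h1 | h1] <;>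
      simp [h1]

theorem foldl_pvUpd_some (t : List Int) : ∀ v : Int, t.foldl pvUpd (some v) = some (t.foldl max v) := by
  induction t with
  | nil => intro v; rfl
  | cons c t ih =>
    intro v
    simp only [List.foldl_cons]
    have : pvUpd (some v) c = some (max v c) := by
      simp only [pvUpd]
      congr 1
      rcases Int.lt_or_le v c with h | h
      · rw [if_pos (by omega), max_eq_right h.le]
      · rw [if_neg (by omega), max_eq_left h]
    rw [this, ih]

theorem fold_max_eq (S : List Int) (h : S ≠ []) :
    S.foldl pvUpd none = PySem.List.max? S id := by
  obtain ⟨c, t, rfl⟩ := List.exists_cons_of_ne_nil h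
  have hne : PySem.List.max? (c :: t) id ≠ none := by
    rw [Ne, PySem.List.max?_eq_none_iff]; simp
  obtain ⟨m, hm⟩ := Option.ne_none_iff_exists'.mp hne
  rw [hm]
  simp only [List.foldl_cons]
  have h1 : pvUpd none c = some c := rfl
  rw [h1, foldl_pvUpd_some]
  congr 1
  have hmem := PySem.List.max?_mem hm
  have hmax := PySem.List.max?_isMax hm
  obtain ⟨hc, hall⟩ := PySem.List.le_foldl_max t c
  have hFmem := foldl_max_mem t c
  have hFle : t.foldl max c ≤ m := hmax _ hFmem
  have hmle : m ≤ t.foldl max c := by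
    rcases List.mem_cons.mp hmem with h1 | h1
    · rw [h1]; exact hc
    · exact hall _ h1
  omega

-- ---- main assembly ----

theorem main_neg (counts : List Int) (tw : Int) (hneg : tw < 0) :
    downsample_to_width_py counts tw = downsample_to_width_py_alt counts tw := by
  have hnil : PySem.List.pyRange 0 tw 1 = [] := PySem.List.pyRange_one_eq_nil hneg.le
  have htn : tw.toNat = 0 := Int.toNat_of_nonpos hneg.le
  simp only [downsample_to_width_py, downsample_to_width_py_alt, hnil, htn,
    List.replicate_zero, List.foldl_nil, List.map_nil]
  have h0 : ((PySem.List.enumerate counts 0).foldl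
      (fun res jc => if ((PySem.List.bisectRight ([] : List Int) jc.1 : Int) < tw)
        then res.set (PySem.List.bisectRight ([] : List Int) jc.1)
          (pvUpd (res.getD (PySem.List.bisectRight ([] : List Int) jc.1) none) jc.2)
        else res) ([] : List (Option Int))) = [] := by
    apply List.eq_nil_of_length_eq_zero
    exact foldB_len (fun x => PySem.List.bisectRight ([] : List Int) x) tw _ []
  rw [h0]
  rfl

theorem main_pos (counts : List Int) (tw : Int) (hpos : 0 < tw) :
    downsample_to_width_py counts tw = downsample_to_width_py_alt counts tw := by
  have hwpos : 0 < tw.natAbs := by omega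
  simp only [downsample_to_width_py, downsample_to_width_py_alt,
    bDiv_eq counts.length tw.natAbs hwpos, bMul_eq, bTrunc_eq]
  set bpc := pvDivF counts.length tw.natAbs with hbpc
  set E : Nat → Nat := fun k => pvTruncF (pvMulF k bpc) with hE
  set W := tw.toNat with hW
  have htwW : (W : Int) = tw := Int.toNat_of_nonneg hpos.le
  set ends : List Int := (PySem.List.pyRange 0 tw 1).map
      (fun i => ((pvTruncF (pvMulF (i.toNat + 1) bpc) : Nat) : Int)) with hends
  set g : Int → Nat := fun j => PySem.List.bisectRight ends j with hg
  have hendslen : ends.length = W := by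
    rw [hends, List.length_map, PySem.List.length_pyRange_one]
    omega
  have hval : ∀ (k : Nat) (hk : k < ends.length), ends[k] = (E (k + 1) : Int) := by
    intro k hk
    have hk' : k < (PySem.List.pyRange 0 tw 1).length := by
      rw [hends, List.length_map] at hk; exact hk
    show (List.map (fun i : Int => ((pvTruncF (pvMulF (i.toNat + 1) bpc) : Nat) : Int))
        (PySem.List.pyRange 0 tw 1))[k]'(by rw [List.length_map]; exact hk') = ((E (k + 1) : Nat) : Int)
    rw [List.getElem_map, PySem.List.getElem_pyRange_one _ _ _ hk']
    simp [hE]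
  have hbucket : ∀ (j : Int), 0 ≤ j → ∀ i : Nat, i < W →
      (g j = i ↔ ((E i : Int) ≤ j ∧ j < (E (i + 1) : Int))) := by
    intro j hj i hi
    exact bucket_eq E (fun {p q} h => pvE_mono bpc h) (pvE_zero bpc) W ends hendslen hval j hj i hi
  -- A as a map over the range
  have hstep : (fun (scaled : List Int) (i : Int) =>
        let start_idx := pvTruncF (pvMulF i.toNat bpc);
        let end_idx := pvTruncF (pvMulF (i.toNat + 1) bpc);
        if start_idx < end_idx then
          scaled ++ [(PySem.List.max? (PySem.List.slice counts (some (start_idx : Int)) (some (end_idx : Int))) id).getD 0]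
        else scaled ++ [0])
      = (fun (scaled : List Int) (i : Int) => scaled ++
          [if E i.toNat < E (i.toNat + 1) then
            (PySem.List.max? (PySem.List.slice counts (some ((E i.toNat : Nat) : Int)) (some ((E (i.toNat + 1) : Nat) : Int))) id).getD 0
          else 0]) := by
    funext scaled i
    show (if E i.toNat < E (i.toNat + 1) then _ else _) = _
    split <;> rfl
  rw [hstep, PySem.List.foldl_append_singleton_eq_map, List.nil_append]
  -- lengths
  apply List.ext_getElem
  · rw [List.length_map, PySem.List.length_pyRange_one, List.length_map]
    rw [foldB_len g tw _ _]
    simp [hW]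
  intro i hi1 hi2
  have hiW : i < W := by
    rw [List.length_map, PySem.List.length_pyRange_one] at hi1
    omega
  -- A[i]
  have hi1' : i < (PySem.List.pyRange 0 tw 1).length := by
    rw [List.length_map] at hi1; exact hi1
  rw [List.getElem_map, PySem.List.getElem_pyRange_one _ _ _ hi1']
  have hzt : ((0 : Int) + (i : Int)).toNat = i := by omega
  rw [hzt]
  -- B[i]
  have hreslen : ((PySem.List.enumerate counts 0).foldl
      (fun res jc => if ((g jc.1 : Int) < tw) then res.set (g jc.1) (pvUpd (res.getD (g jc.1) none) jc.2) else res)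
      (List.replicate W none)).length = W := by
    rw [foldB_len g tw _ _]; simp
  rw [List.getElem_map]
  rw [← List.getD_eq_getElem _ none (by rw [hreslen]; exact hiW)]
  rw [foldB_get g tw counts 0 (List.replicate W none) i (by simp; exact hiW) (by omega)]
  rw [List.getD_replicate _ hiW]
  -- decompose counts around the bucket [E i, E (i+1))
  have hab : E i ≤ E (i + 1) := pvE_mono bpc (Nat.le_succ i)
  set a := E i with ha
  set b := E (i + 1) with hb
  set P := counts.take a with hP
  set S := (counts.drop a).take (b - a) with hS
  set T := counts.drop b with hT
  have hsplit : counts = P ++ (S ++ T) := by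
    rw [hP, hS, hT]
    conv_lhs => rw [← List.take_append_drop a counts]
    congr 1
    conv_lhs => rw [← List.take_append_drop (b - a) (counts.drop a)]
    congr 1
    rw [List.drop_drop]
    congr 1
    omega
  have hPlen : P.length = min a counts.length := by rw [hP, List.length_take]
  have hSlen : S.length ≤ b - a := by rw [hS, List.length_take]; omega
  have haccsplit : (PySem.List.enumerate counts 0).foldl
        (fun acc jc => if g jc.1 = i then pvUpd acc jc.2 else acc) (none : Option Int)
      = S.foldl pvUpd none := by
    conv_lhs => rw [hsplit]
    rw [PySem.List.enumerate_append, List.foldl_append, PySem.List.enumerate_append, List.foldl_append]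
    rw [acc_skip g i _ ?hPskip none]
    case hPskip =>
      intro p hp hgi
      obtain ⟨k, hk, rfl⟩ := (PySem.List.mem_enumerate_iff _ _ _).mp hp
      have := (hbucket (0 + (k : Int)) (by omega) i hiW).mp hgi
      have hkP : k < P.length := hk
      omega
    rw [acc_skip g i (PySem.List.enumerate T (0 + (P.length : Int) + (S.length : Int))) ?hTskip _]
    case hTskip =>
      intro p hp hgi
      obtain ⟨k, hk, rfl⟩ := (PySem.List.mem_enumerate_iff _ _ _).mp hp
      have hTne : T ≠ [] := by intro hnil; rw [hnil] at hk; simp at hk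
      have hbn : b < counts.length := by
        by_contra hc
        exact hTne (by rw [hT]; exact List.drop_eq_nil_iff.mpr (by omega))
      have hPa : P.length = a := by omega
      have hSb : S.length = b - a := by
        rw [hS, List.length_take, List.length_drop]
        omega
      have := (hbucket _ (by omega) i hiW).mp hgi
      omega
    rw [acc_all g i _ ?hSall _]
    case hSall =>
      intro p hp
      obtain ⟨k, hk, rfl⟩ := (PySem.List.mem_enumerate_iff _ _ _).mp hp
      have hSne : S ≠ [] := by intro hnil; rw [hnil] at hk; simp at hk
      have hdropne : counts.drop a ≠ [] := by
        intro hnil; rw [hS, hnil] at hSne; simp at hSne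
      have han : a < counts.length := by
        by_contra hc
        exact hdropne (List.drop_eq_nil_iff.mpr (by omega))
      have hPa : P.length = a := by omega
      apply (hbucket _ (by omega) i hiW).mpr
      constructor
      · push_cast
        omega
      · push_cast
        omega
    exact enum_snd_fold S _ none
  rw [haccsplit]
  -- final comparison
  have hslice : PySem.List.slice counts (some ((a : Nat) : Int)) (some ((b : Nat) : Int)) = S := by
    rw [PySem.List.slice_natCast]
  rw [hslice]
  by_cases hS0 : S = []
  · rw [hS0]
    split <;> rfl
  · have hS0' : a < b := by
      by_contra hc
      exact hS0 (by rw [hS]; have : b - a = 0 := by omega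
                    rw [this]; exact List.take_zero)
    rw [if_pos hS0', fold_max_eq S hS0]

-- ===== VERDICT (by name: the statement is the Claim_ definition above) =====
theorem downsample_to_width_py_spec : Claim_equal_downsample_to_width_py := by
  unfold Claim_equal_downsample_to_width_py
  intro counts tw _hdom hpre
  unfold Spec_downsample_to_width_py
  unfold Pre_downsample_to_width_py at hpre
  rcases lt_or_gt_of_ne hpre with hneg | hpos
  · exact main_neg counts tw hneg
  · exact main_pos counts tw hpos
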